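-- pv_equiv track=rewrite | github.com/ErgodicEntropy/Smart-Task-Manager | main.py | daymetric
-- ===== SOURCE A (Python) =====
-- def daymetric(peak_daytime,current_daytime):
--     daydict = {
--         "Early Morning": 1,
--         "Late Morning": 2,
--         "Afternoon": 3,
--         "Evening": 4,
--         "Night": 5,
--         "Midnight": 6
--     }
--     if peak_daytime in daydict and current_daytime in daydict:
--         daydist = {}
--         for dt in daydict:
--             daydist[dt] = 6 - abs(daydict[peak_daytime] - daydict[dt])
--
--         return daydist[current_daytime]
--     else:
--         return 0
-- ===== SOURCE B (Python) =====
-- def daymetric(peak_daytime, current_daytime):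
--     order = ("Early Morning", "Late Morning", "Afternoon",
--              "Evening", "Night", "Midnight")
--     if peak_daytime not in order or current_daytime not in order:
--         return 0
--     if peak_daytime == current_daytime:
--         return 6
--     # single scan: start from 6 and subtract one per step between the two labels
--     score = 6
--     counting = False
--     for label in order:
--         if counting:
--             score -= 1
--             if label == peak_daytime or label == current_daytime:
--                 break
--         elif label == peak_daytime or label == current_daytime:
--             counting = True
--     return score
-- ===== Notes on version B (the rewrite author's own statement) =====
-- stated objective: alternative
-- what changed: B drops the dict, the positional arithmetic and the build-the-whole-distance-table loop: it walks the ordered label list once with a state flag, counting down from 6 one step per label between the two matches (equal labels short-circuit to 6, unknown labels to 0).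
import Mathlib
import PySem

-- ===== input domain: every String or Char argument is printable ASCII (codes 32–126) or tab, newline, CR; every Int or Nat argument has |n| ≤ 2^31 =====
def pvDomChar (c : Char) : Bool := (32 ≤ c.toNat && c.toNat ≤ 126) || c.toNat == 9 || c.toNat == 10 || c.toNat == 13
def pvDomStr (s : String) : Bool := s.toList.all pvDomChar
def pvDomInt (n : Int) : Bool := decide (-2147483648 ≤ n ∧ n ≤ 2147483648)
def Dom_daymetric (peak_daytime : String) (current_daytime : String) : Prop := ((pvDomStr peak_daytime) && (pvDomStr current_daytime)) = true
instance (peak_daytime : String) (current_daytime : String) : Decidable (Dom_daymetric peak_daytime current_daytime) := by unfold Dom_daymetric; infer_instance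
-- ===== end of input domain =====

-- B: instead of positions, a dict and abs, a single scan over the ordered labels counts the
-- steps between the two labels with a state flag (same values, same 0 fallback); objective: alternative.
-- Both ports handle the label strings as char lists (String.toList, the PySem.Chars convention,
-- exact on this domain) so that label comparisons are kernel-evaluable.

-- ===== PORT A =====
def pvDayDict : PySem.Dict (List Char) Int :=
  PySem.Dict.ofList
    [("Early Morning".toList, 1), ("Late Morning".toList, 2), ("Afternoon".toList, 3),
     ("Evening".toList, 4), ("Night".toList, 5), ("Midnight".toList, 6)]

def daymetricCore (P : List Char) (C : List Char) : Int :=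
  let daydict := pvDayDict
  if daydict.contains P ∧ daydict.contains C then
    -- build daydist over every key dt of daydict, then index it at the current label
    let daydist : PySem.Dict (List Char) Int :=
      daydict.keys.foldl
        (fun d dt => d.insert dt (6 - ((daydict.getD P 0 - daydict.getD dt 0).natAbs : Int)))
        PySem.Dict.empty
    daydist.getD C 0   -- key present: C ∈ keys, so getD returns the stored value
  else
    0

def daymetric (peak_daytime : String) (current_daytime : String) : Int :=
  daymetricCore peak_daytime.toList current_daytime.toList

-- ===== PORT B =====
def pvOrder : List (List Char) :=
  ["Early Morning".toList, "Late Morning".toList, "Afternoon".toList,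
   "Evening".toList, "Night".toList, "Midnight".toList]

-- Source B's for-loop with `break` as structural recursion over the label list,
-- carrying the (score, counting) state.
def pvScan (P C : List Char) (score : Int) (counting : Bool) : List (List Char) → Int
  | [] => score
  | l :: rest =>
    if counting then
      if l = P ∨ l = C then score - 1 else pvScan P C (score - 1) true rest
    else if l = P ∨ l = C then pvScan P C score true rest
    else pvScan P C score false rest

def daymetric_altCore (P : List Char) (C : List Char) : Int :=
  if P ∉ pvOrder ∨ C ∉ pvOrder then 0
  else if P = C then 6
  else pvScan P C 6 false pvOrder

def daymetric_alt (peak_daytime : String) (current_daytime : String) : Int :=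
  daymetric_altCore peak_daytime.toList current_daytime.toList

-- ===== PRECONDITION & SPEC =====
def Spec_daymetric (peak_daytime : String) (current_daytime : String) (out : Int) : Prop := out = daymetric_alt peak_daytime current_daytime
instance (peak_daytime : String) (current_daytime : String) (out : Int) : Decidable (Spec_daymetric peak_daytime current_daytime out) := by unfold Spec_daymetric; infer_instance

-- ===== CLAIM (what is proved, stated in full; the proofs are below) =====
def Claim_equal_daymetric : Prop := ∀ (peak_daytime : String) (current_daytime : String), Dom_daymetric peak_daytime current_daytime → Spec_daymetric peak_daytime current_daytime (daymetric peak_daytime current_daytime)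

-- ===== LEMMAS AND PROOFS =====

theorem pvDayDict_eq : pvDayDict = PySem.Dict.mk
    [("Early Morning".toList, 1), ("Late Morning".toList, 2), ("Afternoon".toList, 3),
     ("Evening".toList, 4), ("Night".toList, 5), ("Midnight".toList, 6)] := by decide

-- A returns 0 when a label is absent.
theorem daymetricCore_not_mem_left (P C : List Char) (h : P ∉ pvOrder) :
    daymetricCore P C = 0 := by
  have h' : pvDayDict.contains P = false := by
    simp only [pvOrder, List.mem_cons, not_or] at h
    obtain ⟨h1, h2, h3, h4, h5, h6, -⟩ := h
    simp [pvDayDict_eq, PySem.Dict.contains]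
    exact ⟨fun e => h1 e.symm, fun e => h2 e.symm, fun e => h3 e.symm,
           fun e => h4 e.symm, fun e => h5 e.symm, fun e => h6 e.symm⟩
  simp [daymetricCore, h']

theorem daymetricCore_not_mem_right (P C : List Char) (h : C ∉ pvOrder) :
    daymetricCore P C = 0 := by
  have h' : pvDayDict.contains C = false := by
    simp only [pvOrder, List.mem_cons, not_or] at h
    obtain ⟨h1, h2, h3, h4, h5, h6, -⟩ := h
    simp [pvDayDict_eq, PySem.Dict.contains]
    exact ⟨fun e => h1 e.symm, fun e => h2 e.symm, fun e => h3 e.symm,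
           fun e => h4 e.symm, fun e => h5 e.symm, fun e => h6 e.symm⟩
  simp [daymetricCore, h']

theorem daymetricCore_eq_altCore (P C : List Char) :
    daymetricCore P C = daymetric_altCore P C := by
  by_cases hp : P ∈ pvOrder
  · by_cases hc : C ∈ pvOrder
    · -- both labels present: 36 concrete cases
      fin_cases hp <;> fin_cases hc <;> decide
    · rw [daymetricCore_not_mem_right P C hc]
      simp [daymetric_altCore, hc]
  · rw [daymetricCore_not_mem_left P C hp]
    simp [daymetric_altCore, hp]

-- ===== VERDICT (by name: the statement is the Claim_ definition above) =====
theorem daymetric_spec : Claim_equal_daymetric := by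
  intro p c _
  unfold Spec_daymetric daymetric daymetric_alt
  exact daymetricCore_eq_altCore p.toList c.toList
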